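-- pv_equiv track=rewrite | github.com/iius-rcox/Credit_Card_Processor | backend/app/services/line_matching.py | _bigrams
-- ===== SOURCE A (Python) =====
-- from typing import Dict, Any, List, Tuple
--
-- def _bigrams(text: str) -> List[str]:
--     s = (text or "").upper()
--     s = "".join(ch for ch in s if ch.isalnum() or ch.isspace())
--     tokens = s.split()
--     grams: List[str] = []
--     for tok in tokens:
--         if len(tok) >= 2:
--             grams.extend([tok[i : i + 2] for i in range(len(tok) - 1)])
--         else:
--             grams.append(tok)
--     return grams
-- ===== SOURCE B (Python) =====
-- from typing import List
--
-- def _bigrams(text: str) -> List[str]: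
--     # Single pass: keep the previous in-token character and the running token
--     # length; emit bigrams as the token grows, a lone character when a token
--     # of length 1 ends. No token list is ever built.
--     grams: List[str] = []
--     prev = ""
--     tok_len = 0
--     for ch in (text or "").upper():
--         if ch.isspace():
--             if tok_len == 1:
--                 grams.append(prev)
--             prev, tok_len = "", 0
--         elif ch.isalnum():
--             if tok_len >= 1:
--                 grams.append(prev + ch)
--             prev, tok_len = ch, tok_len + 1
--         # other characters are dropped without ending the token
--     if tok_len == 1:
--         grams.append(prev)
--     return grams
-- ===== Notes on version B (the rewrite author's own statement) =====
-- stated objective: alternative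
-- what changed: Replaced the filter/split/per-token-comprehension pipeline with a single character-by-character state machine that keeps only the previous in-token character and the running token length, never building the filtered string or token list.
import Mathlib
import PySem

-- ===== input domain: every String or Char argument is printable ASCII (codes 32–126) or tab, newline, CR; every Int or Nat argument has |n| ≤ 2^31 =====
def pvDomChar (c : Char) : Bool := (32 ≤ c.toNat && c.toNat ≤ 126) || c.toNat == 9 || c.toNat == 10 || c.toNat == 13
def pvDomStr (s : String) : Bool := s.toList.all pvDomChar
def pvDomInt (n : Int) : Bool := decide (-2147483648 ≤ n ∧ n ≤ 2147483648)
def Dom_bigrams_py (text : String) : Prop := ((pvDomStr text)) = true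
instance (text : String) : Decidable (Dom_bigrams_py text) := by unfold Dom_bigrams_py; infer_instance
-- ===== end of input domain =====

-- B replaces A's filter/split/per-token-comprehension pipeline by one character-level
-- state machine (previous in-token char + running token length); same output, same cost.

-- ===== PORT A =====
-- A: s = (text or "").upper(); keep alnum/space chars; split(); per token emit the
-- adjacent-pair slices (len>=2) or the token itself (len<2).
-- '(text or "")' equals text for every string (it is "" exactly when text is ""), so it is ported as text.
def bigrams_py (text : String) : List String :=
  (PySem.Chars.split₀
      ((PySem.Chars.upper text.toList).filter
        (fun ch => PySem.Chars.isalnum ch || PySem.Chars.isspace ch))).foldl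
    (fun grams tok =>
      if 2 ≤ tok.length then
        grams ++ (PySem.List.pyRange 0 ((tok.length : Int) - 1) 1).map
          (fun i => String.ofList (PySem.List.slice tok (some i) (some (i + 2))))
      else grams ++ [String.ofList tok]) []

-- ===== PORT B =====
-- B-side loop: prev is the previous in-token character (a 0/1-char string, here a List Char),
-- tokLen the running length of the current token, grams the output accumulator.
def bigramsAltLoop : List Char → List Char → Nat → List String → List String
  | [], prev, tokLen, grams =>
      if tokLen = 1 then grams ++ [String.ofList prev] else grams
  | c :: rest, prev, tokLen, grams =>
      if PySem.Chars.isspace c then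
        bigramsAltLoop rest [] 0 (if tokLen = 1 then grams ++ [String.ofList prev] else grams)
      else if PySem.Chars.isalnum c then
        bigramsAltLoop rest [c] (tokLen + 1)
          (if 1 ≤ tokLen then grams ++ [String.ofList (prev ++ [c])] else grams)
      else
        bigramsAltLoop rest prev tokLen grams

def bigrams_py_alt (text : String) : List String :=
  bigramsAltLoop (PySem.Chars.upper text.toList) [] 0 []

-- ===== PRECONDITION & SPEC =====
def Spec_bigrams_py (text : String) (out : List String) : Prop := out = bigrams_py_alt text
instance (text : String) (out : List String) : Decidable (Spec_bigrams_py text out) := by unfold Spec_bigrams_py; infer_instance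

-- ===== CLAIM (what is proved, stated in full; the proofs are below) =====
def Claim_equal_bigrams_py : Prop := ∀ (text : String), Dom_bigrams_py text → Spec_bigrams_py text (bigrams_py text)

-- ===== LEMMAS AND PROOFS =====

-- the predicate A filters by
def keepCh (c : Char) : Bool := PySem.Chars.isalnum c || PySem.Chars.isspace c

-- consecutive-pair bigrams of a token
def pairs : List Char → List String
  | a :: b :: rest => String.ofList [a, b] :: pairs (b :: rest)
  | _ => []

-- grams A emits for one token
def tokGrams (tok : List Char) : List String :=
  if 2 ≤ tok.length then pairs tok else [String.ofList tok]

-- reference word splitter (split₀ without the reversed accumulators)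
def wordsRef : List Char → List Char → List (List Char)
  | [], cur => if cur = [] then [] else [cur]
  | c :: cs, cur =>
      if PySem.Chars.isspace c then
        (if cur = [] then wordsRef cs [] else cur :: wordsRef cs [])
      else wordsRef cs (cur ++ [c])

-- last character of a token as a 0/1-element list
def last1 (t : List Char) : List Char := t.reverse.take 1

theorem last1_cons (a : Char) (t : List Char) (h : t ≠ []) : last1 (a :: t) = last1 t := by
  have h1 : 1 ≤ t.reverse.length := by
    have := List.length_pos_of_ne_nil h
    simpa using this
  simp only [last1, List.reverse_cons]
  rw [List.take_append_of_le_length h1]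

theorem pairs_snoc (t : List Char) (c : Char) :
    pairs (t ++ [c]) = pairs t ++ (if t = [] then [] else [String.ofList (last1 t ++ [c])]) := by
  induction t with
  | nil => simp [pairs]
  | cons a t ih =>
    cases t with
    | nil => simp [pairs, last1]
    | cons b t' =>
      have ihb := ih
      simp only [List.cons_append] at ihb ⊢
      rw [pairs, pairs, ihb]
      rw [last1_cons a (b :: t') (by simp)]
      simp

theorem splitGo_eq (cs : List Char) : ∀ (cur : List Char) (acc : List (List Char)),
    PySem.Chars.split₀.go cs cur acc = acc.reverse ++ wordsRef cs cur.reverse := by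
  induction cs with
  | nil =>
    intro cur acc
    simp only [PySem.Chars.split₀.go, wordsRef]
    by_cases h : cur = []
    · simp [h]
    · simp [h, List.isEmpty_iff]
  | cons c rest ih =>
    intro cur acc
    simp only [PySem.Chars.split₀.go, wordsRef]
    by_cases hs : PySem.Chars.isspace c = true
    · by_cases h : cur = []
      · simp [hs, h, ih]
      · simp [hs, h, List.isEmpty_iff, ih]
    · simp [hs, ih, List.reverse_cons]

theorem loop_words (cs : List Char) : ∀ (t : List Char) (g : List String),
    (∀ c ∈ cs, PySem.Chars.isspace c = false → PySem.Chars.isalnum c = true) →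
    (∀ c ∈ t, PySem.Chars.isspace c = false) →
    bigramsAltLoop cs (last1 t) t.length (g ++ pairs t)
      = g ++ ((wordsRef cs t).map tokGrams).flatten := by
  induction cs with
  | nil =>
    intro t g _ _
    simp only [bigramsAltLoop, wordsRef]
    by_cases h : t = []
    · simp [h, pairs]
    · match t, h with
      | [a], _ => simp [pairs, last1, tokGrams]
      | a :: b :: t', _ =>
        have h2 : 2 ≤ (a :: b :: t').length := by simp
        simp [tokGrams, List.length_cons]
  | cons c rest ih =>
    intro t g hcs ht
    simp only [bigramsAltLoop, wordsRef]
    by_cases hsp : PySem.Chars.isspace c = true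
    · simp only [hsp, if_true]
      have step : (if t.length = 1 then (g ++ pairs t) ++ [String.ofList (last1 t)] else g ++ pairs t)
          = g ++ (if t = [] then [] else [tokGrams t]).flatten := by
        by_cases h : t = []
        · simp [h, pairs]
        · match t, h with
          | [a], _ => simp [pairs, last1, tokGrams]
          | a :: b :: t', _ =>
            have h2 : 2 ≤ (a :: b :: t').length := by simp
            simp [tokGrams, List.length_cons]
      have ih0 := ih [] (g ++ (if t = [] then [] else [tokGrams t]).flatten)
        (fun c hc => hcs c (List.mem_cons_of_mem _ hc)) (by simp)
      simp only [last1, List.reverse_nil, List.take_nil, List.length_nil, pairs,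
        List.append_nil] at ih0
      rw [step, ih0]
      by_cases h : t = [] <;> simp [h]
    · have hs' : PySem.Chars.isspace c = false := by simpa using hsp
      have ha : PySem.Chars.isalnum c = true := hcs c (List.mem_cons_self) hs'
      simp only [hs', ha, Bool.false_eq_true, if_false, if_true]
      have step : (if 1 ≤ t.length then (g ++ pairs t) ++ [String.ofList (last1 t ++ [c])] else g ++ pairs t)
          = g ++ pairs (t ++ [c]) := by
        rw [pairs_snoc]
        by_cases h : t = []
        · simp [h]
        · have h1 : 1 ≤ t.length := List.length_pos_of_ne_nil h
          simp [h, h1]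
      have ih1 := ih (t ++ [c]) g (fun c hc => hcs c (List.mem_cons_of_mem _ hc))
        (by intro x hx; rcases List.mem_append.mp hx with h | h
            · exact ht x h
            · simp at h; subst h; exact hs')
      have hlast : last1 (t ++ [c]) = [c] := by simp [last1]
      have hlen : (t ++ [c]).length = t.length + 1 := by simp
      rw [step]
      rw [hlast, hlen] at ih1
      exact ih1

theorem range_map_eq_pairs (tok : List Char) (h : 2 ≤ tok.length) :
    (PySem.List.pyRange 0 ((tok.length : Int) - 1) 1).map
        (fun i => String.ofList (PySem.List.slice tok (some i) (some (i + 2))))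
      = pairs tok := by
  have key : ∀ (tok : List Char), tok ≠ [] →
      (List.range (tok.length - 1)).map
          (fun k => String.ofList ((tok.drop k).take 2)) = pairs tok := by
    intro tok
    induction tok with
    | nil => intro h; exact absurd rfl h
    | cons a t ih =>
      intro _
      cases t with
      | nil => simp [pairs]
      | cons b t' =>
        have ihb := ih (by simp)
        simp only [List.length_cons, Nat.add_sub_cancel] at *
        rw [List.range_succ_eq_map]
        simp only [List.map_cons, List.map_map, pairs]
        refine List.cons_eq_cons.mpr ⟨rfl, ?_⟩
        rw [← ihb]
        rfl
  have hne : tok ≠ [] := by intro h0; subst h0; simp at h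
  rw [← key tok hne]
  have hcast : ((tok.length : Int) - 1) = ((tok.length - 1 : Nat) : Int) := by
    have : 1 ≤ tok.length := by omega
    omega
  rw [hcast, PySem.List.pyRange_zero_natCast, List.map_map]
  apply List.map_congr_left
  intro k hk
  simp only [Function.comp]
  congr 1
  have h2 : ((k : Int) + 2) = ((k : Int) + ((2 : Nat) : Int)) := by norm_num
  rw [h2, PySem.List.slice_natCast_add]

theorem filter_skip (cs : List Char) : ∀ (prev : List Char) (n : Nat) (g : List String),
    bigramsAltLoop cs prev n g = bigramsAltLoop (cs.filter keepCh) prev n g := by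
  induction cs with
  | nil => intro prev n g; rfl
  | cons c rest ih =>
    intro prev n g
    by_cases hs : PySem.Chars.isspace c = true
    · have : keepCh c = true := by simp [keepCh, hs]
      simp [bigramsAltLoop, hs, this, ih]
    · by_cases ha : PySem.Chars.isalnum c = true
      · have : keepCh c = true := by simp [keepCh, ha]
        simp [bigramsAltLoop, hs, ha, this, ih]
      · have : keepCh c = false := by simp [keepCh, ha, hs]
        simp [bigramsAltLoop, hs, ha, this, ih]

theorem fold_tokens (toks : List (List Char)) : ∀ (g : List String),
    toks.foldl (fun grams tok =>
        if 2 ≤ tok.length then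
          grams ++ (PySem.List.pyRange 0 ((tok.length : Int) - 1) 1).map
            (fun i => String.ofList (PySem.List.slice tok (some i) (some (i + 2))))
        else grams ++ [String.ofList tok]) g
      = g ++ (toks.map tokGrams).flatten := by
  induction toks with
  | nil => intro g; simp
  | cons tok toks ih =>
    intro g
    simp only [List.foldl_cons, List.map_cons, List.flatten_cons]
    by_cases h2 : 2 ≤ tok.length
    · rw [if_pos h2, ih, range_map_eq_pairs tok h2]
      simp [tokGrams, h2]
    · rw [if_neg h2, ih]
      simp [tokGrams, h2]

-- ===== VERDICT (by name: the statement is the Claim_ definition above) =====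
theorem bigrams_py_spec : Claim_equal_bigrams_py := by
  intro text _
  unfold Spec_bigrams_py bigrams_py bigrams_py_alt
  rw [filter_skip]
  have hfilter : (PySem.Chars.upper text.toList).filter keepCh
      = (PySem.Chars.upper text.toList).filter
          (fun ch => PySem.Chars.isalnum ch || PySem.Chars.isspace ch) := rfl
  rw [hfilter]
  set fs := (PySem.Chars.upper text.toList).filter
      (fun ch => PySem.Chars.isalnum ch || PySem.Chars.isspace ch) with hfs
  have hfsP : ∀ c ∈ fs, PySem.Chars.isspace c = false → PySem.Chars.isalnum c = true := by
    intro c hc hns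
    have := List.of_mem_filter hc
    simp only [Bool.or_eq_true] at this
    rcases this with h | h
    · exact h
    · rw [hns] at h; exact absurd h (by simp)
  have hmach := loop_words fs [] [] hfsP (by simp)
  simp only [last1, List.reverse_nil, List.take_nil, List.length_nil, pairs,
    List.append_nil, List.nil_append] at hmach
  have hsplit : PySem.Chars.split₀ fs = wordsRef fs [] := by
    have := splitGo_eq fs [] []
    simpa [PySem.Chars.split₀] using this
  rw [hsplit, fold_tokens, hmach]
  simp
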